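-- pv_equiv track=rewrite | github.com/TiagoCDonatoni/prevIA | backend/src/catalog/json_pick.py | pick_season_year
-- ===== SOURCE A (Python) =====
-- from typing import Any, List, Optional
--
-- def pick_season_year(seasons_list: Any, mode: str = "latest") -> Optional[int]:
--     """
--     seasons_list: lista de dicts com ['year'].
--     mode: latest|earliest
--     """
--     if not isinstance(seasons_list, list) or not seasons_list:
--         return None
--     years: List[int] = []
--     for s in seasons_list:
--         if isinstance(s, dict) and isinstance(s.get("year"), int):
--             years.append(s["year"])
--     if not years:
--         return None
--     return max(years) if mode == "latest" else min(years)
-- ===== SOURCE B (Python) =====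
-- def pick_season_year(seasons_list, mode="latest"):
--     if not isinstance(seasons_list, list):
--         return None
--     best = None
--     for s in seasons_list:
--         if isinstance(s, dict) and isinstance(s.get("year"), int):
--             y = s["year"]
--             if best is None or (y > best if mode == "latest" else y < best):
--                 best = y
--     return best
-- ===== Notes on version B (the rewrite author's own statement) =====
-- stated objective: simpler
-- what changed: B computes the extremum in a single pass with a running best accumulator instead of building an intermediate years list and calling max/min on it.
import Mathlib
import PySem

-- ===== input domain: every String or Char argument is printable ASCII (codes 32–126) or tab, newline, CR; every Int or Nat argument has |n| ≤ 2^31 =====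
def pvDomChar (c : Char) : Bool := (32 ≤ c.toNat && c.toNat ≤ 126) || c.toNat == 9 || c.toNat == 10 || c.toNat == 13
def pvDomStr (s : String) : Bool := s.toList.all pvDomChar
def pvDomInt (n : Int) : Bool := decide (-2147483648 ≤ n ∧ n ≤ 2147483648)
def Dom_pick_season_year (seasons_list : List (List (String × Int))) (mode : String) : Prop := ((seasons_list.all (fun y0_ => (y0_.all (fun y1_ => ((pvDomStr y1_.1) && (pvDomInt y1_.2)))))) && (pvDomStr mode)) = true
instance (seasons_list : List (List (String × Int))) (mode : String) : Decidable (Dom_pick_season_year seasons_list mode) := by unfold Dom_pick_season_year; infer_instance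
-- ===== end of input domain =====

-- B replaces A's intermediate years list + max/min call by a single pass with a running best accumulator (objective: simpler).


-- ===== PORT A =====
-- s.get("year") on an association-list dict: first match
def pick_season_year (seasons_list : List (List (String × Int))) (mode : String) : Option Int :=
  if seasons_list = [] then none
  else
    let years : List Int := seasons_list.foldl (fun acc s =>
      match s.lookup "year" with
      | some y => acc ++ [y]
      | none => acc) []
    if years = [] then none
    else if mode = "latest" then PySem.List.max? years (fun y => y)
    else PySem.List.min? years (fun y => y)

-- ===== PORT B =====
def pickStep (mode : String) (best : Option Int) (s : List (String × Int)) : Option Int :=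
  match s.lookup "year" with
  | none => best
  | some y =>
    match best with
    | none => some y
    | some b => if (if mode = "latest" then b < y else y < b) then some y else some b

def pick_season_year_alt (seasons_list : List (List (String × Int))) (mode : String) : Option Int :=
  seasons_list.foldl (pickStep mode) none

-- ===== PRECONDITION & SPEC =====
def Spec_pick_season_year (seasons_list : List (List (String × Int))) (mode : String) (out : Option Int) : Prop := out = pick_season_year_alt seasons_list mode
instance (seasons_list : List (List (String × Int))) (mode : String) (out : Option Int) : Decidable (Spec_pick_season_year seasons_list mode out) := by unfold Spec_pick_season_year; infer_instance

-- ===== CLAIM (what is proved, stated in full; the proofs are below) =====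
def Claim_equal_pick_season_year : Prop := ∀ (seasons_list : List (List (String × Int))) (mode : String), Dom_pick_season_year seasons_list mode → Spec_pick_season_year seasons_list mode (pick_season_year seasons_list mode)

-- ===== LEMMAS AND PROOFS =====
def yearsOf (ss : List (List (String × Int))) : List Int :=
  ss.filterMap (List.lookup "year")

lemma foldlA_eq (ss : List (List (String × Int))) :
    ∀ acc : List Int,
      ss.foldl (fun acc s =>
        match s.lookup "year" with
        | some y => acc ++ [y]
        | none => acc) acc = acc ++ yearsOf ss := by
  induction ss with
  | nil => intro acc; simp [yearsOf]
  | cons s t ih =>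
    intro acc
    simp only [List.foldl_cons]
    cases h : s.lookup "year" <;> simp [yearsOf, h, ih]

lemma foldlB_eq (mode : String) (ss : List (List (String × Int))) :
    ∀ best : Option Int,
      ss.foldl (pickStep mode) best = (yearsOf ss).foldl (fun b y =>
        match b with
        | none => some y
        | some b => if (if mode = "latest" then b < y else y < b) then some y else some b) best := by
  induction ss with
  | nil => intro best; simp [yearsOf]
  | cons s t ih =>
    intro best
    simp only [List.foldl_cons]
    cases h : s.lookup "year" <;> simp [yearsOf, h, ih, pickStep]

lemma foldl_some_max (t : List Int) :
    ∀ b : Int, t.foldl (fun b y =>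
        match b with
        | none => some y
        | some b => if b < y then some y else some b) (some b) = some (t.foldl max b) := by
  induction t with
  | nil => intro b; simp
  | cons y t ih =>
    intro b
    simp only [List.foldl_cons]
    have h1 : (if b < y then some y else some b) = some (max b y) := by
      split_ifs <;> congr 1 <;> omega
    rw [h1, ih]

lemma foldl_some_min (t : List Int) :
    ∀ b : Int, t.foldl (fun b y =>
        match b with
        | none => some y
        | some b => if y < b then some y else some b) (some b) = some (t.foldl min b) := by
  induction t with
  | nil => intro b; simp
  | cons y t ih =>
    intro b
    simp only [List.foldl_cons]
    have h1 : (if y < b then some y else some b) = some (min b y) := by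
      split_ifs <;> congr 1 <;> omega
    rw [h1, ih]

-- ===== VERDICT (by name: the statement is the Claim_ definition above) =====
theorem pick_season_year_spec : Claim_equal_pick_season_year := by
  intro ss mode _
  unfold Spec_pick_season_year pick_season_year pick_season_year_alt
  rw [foldlB_eq, foldlA_eq]
  by_cases hs : ss = []
  · subst hs; simp [yearsOf]
  · simp only [if_neg hs, List.nil_append]
    cases hy : yearsOf ss with
    | nil => simp
    | cons h t =>
      simp only [List.foldl_cons]
      by_cases hm : mode = "latest"
      · simp [hm, PySem.List.max?_id_cons, foldl_some_max]
      · simp [hm, PySem.List.min?_id_cons, foldl_some_min]
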